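-- pv_equiv track=rewrite | github.com/Rohan-Somadder/High-On-DSA | maths/countTheHiddenSequences.py | numberOfArraysApproach3
-- ===== SOURCE A (Python) =====
-- def numberOfArraysApproach3(differences, lower, upper):
--     """
--     :type differences: List[int]8
--     :type lower: int
--     :type upper: int
--     :rtype: int
--     """
--
--     minimumInSequence = 0
--     maximumInSequence = 0
--
--     a = 0
--     for i in differences:
--         a+=i
--         minimumInSequence = min(minimumInSequence, a)
--         maximumInSequence = max(maximumInSequence, a)
--
--     lowerBoundAllowed = lower - minimumInSequence
--     upperBoundAllowed = upper - maximumInSequence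
--
--     return max(0, upperBoundAllowed - lowerBoundAllowed + 1)
-- ===== SOURCE B (Python) =====
-- def numberOfArraysApproach3(differences, lower, upper):
--     # Divide and conquer: for each half-open segment [lo, hi) compute the triple
--     # (segment sum, min prefix sum, max prefix sum) -- prefixes include the empty
--     # prefix 0 -- and merge two halves with
--     #   sum = sL + sR,  min = min(mnL, sL + mnR),  max = max(mxL, sL + mxR),
--     # which is correct because every prefix of the whole segment is either a
--     # prefix of the left half or the left sum plus a prefix of the right half.
--     def seg(lo, hi):
--         if hi <= lo:
--             return (0, 0, 0)
--         if hi - lo == 1: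
--             d = differences[lo]
--             return (d, min(0, d), max(0, d))
--         mid = (lo + hi) // 2
--         sL, mnL, mxL = seg(lo, mid)
--         sR, mnR, mxR = seg(mid, hi)
--         return (sL + sR, min(mnL, sL + mnR), max(mxL, sL + mxR))
--
--     _, mn, mx = seg(0, len(differences))
--     return max(0, (upper - mx) - (lower - mn) + 1)
-- ===== Notes on version B (the rewrite author's own statement) =====
-- stated objective: alternative
-- what changed: Replaces A's single fused left-to-right scan maintaining running min/max prefix sums with a divide-and-conquer recursion that computes a (sum, minPrefix, maxPrefix) aggregate per segment and merges halves with an associative combine rule.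
import Mathlib
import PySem

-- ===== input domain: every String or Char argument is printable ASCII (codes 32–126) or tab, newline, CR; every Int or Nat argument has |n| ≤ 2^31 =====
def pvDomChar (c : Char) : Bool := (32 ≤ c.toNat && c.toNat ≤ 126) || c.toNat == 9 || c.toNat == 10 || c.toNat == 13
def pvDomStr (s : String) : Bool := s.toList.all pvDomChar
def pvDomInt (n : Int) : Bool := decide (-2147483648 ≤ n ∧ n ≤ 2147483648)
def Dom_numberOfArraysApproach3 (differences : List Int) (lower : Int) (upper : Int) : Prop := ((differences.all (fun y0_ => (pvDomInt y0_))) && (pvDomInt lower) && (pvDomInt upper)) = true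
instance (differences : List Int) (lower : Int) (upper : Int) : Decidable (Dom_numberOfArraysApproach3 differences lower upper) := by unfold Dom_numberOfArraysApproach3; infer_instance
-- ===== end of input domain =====

-- B replaces A's fused linear scan by a divide-and-conquer recursion computing a
-- (sum, minPrefix, maxPrefix) aggregate per segment with an explicit combine rule.

-- ===== PORT A =====
-- fused loop: running sum with running min and max
def numberOfArraysApproach3 (differences : List Int) (lower : Int) (upper : Int) : Int :=
  let st := differences.foldl
    (fun (st : Int × Int × Int) i =>
      let a := st.2.2 + i
      (min st.1 a, max st.2.1 a, a)) (0, 0, 0)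
  let lowerBoundAllowed := lower - st.1
  let upperBoundAllowed := upper - st.2.1
  max 0 (upperBoundAllowed - lowerBoundAllowed + 1)

-- ===== PORT B =====
-- divide-and-conquer aggregate over index segments [lo, hi); `differences[lo]` in
-- the leaf case is always in range (lo < hi ≤ length at every call from seg(0, len)),
-- so `getD lo 0` is exact there.
def pvSeg (differences : List Int) (lo hi : Nat) : Int × Int × Int :=
  if hi ≤ lo then (0, 0, 0)
  else if hi - lo = 1 then
    let d := differences.getD lo 0
    (d, min 0 d, max 0 d)
  else
    let mid := (lo + hi) / 2
    let L := pvSeg differences lo mid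
    let R := pvSeg differences mid hi
    (L.1 + R.1, min L.2.1 (L.1 + R.2.1), max L.2.2 (L.1 + R.2.2))
  termination_by hi - lo
  decreasing_by all_goals omega

def numberOfArraysApproach3_alt (differences : List Int) (lower : Int) (upper : Int) : Int :=
  let r := pvSeg differences 0 differences.length
  max 0 ((upper - r.2.2) - (lower - r.2.1) + 1)

-- ===== PRECONDITION & SPEC =====
def Spec_numberOfArraysApproach3 (differences : List Int) (lower : Int) (upper : Int) (out : Int) : Prop := out = numberOfArraysApproach3_alt differences lower upper
instance (differences : List Int) (lower : Int) (upper : Int) (out : Int) : Decidable (Spec_numberOfArraysApproach3 differences lower upper out) := by unfold Spec_numberOfArraysApproach3; infer_instance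

-- ===== CLAIM (what is proved, stated in full; the proofs are below) =====
def Claim_equal_numberOfArraysApproach3 : Prop := ∀ (differences : List Int) (lower : Int) (upper : Int), Dom_numberOfArraysApproach3 differences lower upper → Spec_numberOfArraysApproach3 differences lower upper (numberOfArraysApproach3 differences lower upper)

-- ===== LEMMAS AND PROOFS =====

/-- The running prefix sums of `l` starting after accumulated value `a`. -/
def pvScanFrom : Int → List Int → List Int
  | _, [] => []
  | a, d :: t => (a + d) :: pvScanFrom (a + d) t

/-- The reference aggregate of a list: (sum, min prefix sum, max prefix sum). -/
def pvAgg (l : List Int) : Int × Int × Int :=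
  (l.sum, (pvScanFrom 0 l).foldl min 0, (pvScanFrom 0 l).foldl max 0)

/-- A's fused fold decomposes into two folds over the prefix-sum list. -/
lemma foldA_eq (l : List Int) : ∀ (mn mx a : Int),
    l.foldl (fun (st : Int × Int × Int) i =>
      let a := st.2.2 + i
      (min st.1 a, max st.2.1 a, a)) (mn, mx, a)
    = ((pvScanFrom a l).foldl min mn, (pvScanFrom a l).foldl max mx, a + l.sum) := by
  induction l with
  | nil => simp [pvScanFrom]
  | cons d t ih =>
    intro mn mx a
    simp only [List.foldl_cons, pvScanFrom, List.sum_cons, ih]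
    ring_nf

lemma scan_shift (l : List Int) : ∀ a : Int, pvScanFrom a l = (pvScanFrom 0 l).map (a + ·) := by
  induction l with
  | nil => simp [pvScanFrom]
  | cons d t ih =>
    intro a
    simp only [pvScanFrom, List.map_cons, zero_add, ih d, ih (a + d), List.map_map]
    refine congrArg₂ _ (by ring) ?_
    congr 1; funext x; simp only [Function.comp_apply]; ring

lemma scan_append (l1 l2 : List Int) : ∀ a : Int,
    pvScanFrom a (l1 ++ l2) = pvScanFrom a l1 ++ pvScanFrom (a + l1.sum) l2 := by
  induction l1 with
  | nil => simp [pvScanFrom]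
  | cons d t ih => intro a; simp [pvScanFrom, ih, add_assoc]

lemma foldl_min_min (l : List Int) : ∀ (a b : Int),
    l.foldl min (min a b) = min a (l.foldl min b) := by
  induction l with
  | nil => simp
  | cons d t ih => intro a b; simpa [min_assoc] using ih a (min b d)

lemma foldl_max_max (l : List Int) : ∀ (a b : Int),
    l.foldl max (max a b) = max a (l.foldl max b) := by
  induction l with
  | nil => simp
  | cons d t ih => intro a b; simpa [max_assoc] using ih a (max b d)

lemma foldl_min_map_add (l : List Int) : ∀ (s c : Int),
    (l.map (s + ·)).foldl min (s + c) = s + l.foldl min c := by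
  induction l with
  | nil => simp
  | cons d t ih => intro s c; simpa [min_add_add_left] using ih s (min c d)

lemma foldl_max_map_add (l : List Int) : ∀ (s c : Int),
    (l.map (s + ·)).foldl max (s + c) = s + l.foldl max c := by
  induction l with
  | nil => simp
  | cons d t ih => intro s c; simpa [max_add_add_left] using ih s (max c d)

lemma min_fold_le_sum (l : List Int) : ∀ (c a : Int), c ≤ a →
    (pvScanFrom a l).foldl min c ≤ a + l.sum := by
  induction l with
  | nil => intro c a h; simpa using h
  | cons d t ih =>
    intro c a h
    simp only [pvScanFrom, List.foldl_cons, List.sum_cons]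
    have := ih (min c (a + d)) (a + d) (min_le_right _ _)
    omega

lemma sum_le_max_fold (l : List Int) : ∀ (c a : Int), a ≤ c →
    a + l.sum ≤ (pvScanFrom a l).foldl max c := by
  induction l with
  | nil => intro c a h; simpa using h
  | cons d t ih =>
    intro c a h
    simp only [pvScanFrom, List.foldl_cons, List.sum_cons]
    have := ih (max c (a + d)) (a + d) (le_max_right _ _)
    omega

lemma foldl_min_shift (l : List Int) (a s : Int) (h : a ≤ s) :
    (l.map (s + ·)).foldl min a = min a (s + l.foldl min 0) := by
  have ha : a = min a (s + 0) := by simpa using (min_eq_left h).symm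
  conv_lhs => rw [ha]
  rw [foldl_min_min, foldl_min_map_add]

lemma foldl_max_shift (l : List Int) (a s : Int) (h : s ≤ a) :
    (l.map (s + ·)).foldl max a = max a (s + l.foldl max 0) := by
  have ha : a = max a (s + 0) := by simpa using (max_eq_left h).symm
  conv_lhs => rw [ha]
  rw [foldl_max_max, foldl_max_map_add]

/-- Merge rule for the aggregate. -/
lemma agg_append (l1 l2 : List Int) :
    pvAgg (l1 ++ l2) = ((pvAgg l1).1 + (pvAgg l2).1,
      min (pvAgg l1).2.1 ((pvAgg l1).1 + (pvAgg l2).2.1),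
      max (pvAgg l1).2.2 ((pvAgg l1).1 + (pvAgg l2).2.2)) := by
  have hmn : (pvScanFrom 0 l1).foldl min 0 ≤ l1.sum := by
    simpa using min_fold_le_sum l1 0 0 le_rfl
  have hmx : l1.sum ≤ (pvScanFrom 0 l1).foldl max 0 := by
    simpa using sum_le_max_fold l1 0 0 le_rfl
  unfold pvAgg
  simp only [List.sum_append, scan_append, List.foldl_append, zero_add,
    scan_shift l2 l1.sum]
  simp only [Prod.mk.injEq]
  refine ⟨trivial, ?_, ?_⟩
  · exact foldl_min_shift (pvScanFrom 0 l2) _ _ hmn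
  · exact foldl_max_shift (pvScanFrom 0 l2) _ _ hmx

/-- pvSeg computes the reference aggregate of the corresponding slice. -/
lemma pvSeg_eq (differences : List Int) :
    ∀ k lo hi, hi - lo = k → hi ≤ differences.length →
      pvSeg differences lo hi = pvAgg ((differences.drop lo).take (hi - lo)) := by
  intro k
  induction k using Nat.strong_induction_on with
  | _ k ih =>
    intro lo hi hk hlen
    rw [pvSeg]
    by_cases h0 : hi ≤ lo
    · simp [h0, show hi - lo = 0 by omega, pvAgg, pvScanFrom]
    · by_cases h1 : hi - lo = 1
      · have hlo : lo < differences.length := by omega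
        have hdrop : differences.drop lo = differences[lo] :: differences.drop (lo + 1) :=
          List.drop_eq_getElem_cons hlo
        have hslice : List.take 1 (List.drop lo differences) = [differences[lo]] := by
          rw [hdrop]; rfl
        rw [if_neg h0, if_pos h1, h1, hslice]
        simp [pvAgg, pvScanFrom, List.getElem?_eq_getElem hlo]
      · simp only [h0, h1, if_false]
        have hmidlt : (lo + hi) / 2 - lo < k := by omega
        have hhilt : hi - (lo + hi) / 2 < k := by omega
        rw [ih _ hmidlt lo _ rfl (by omega), ih _ hhilt _ hi rfl hlen]
        have hsplit : (differences.drop lo).take (hi - lo)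
            = (differences.drop lo).take ((lo + hi) / 2 - lo)
              ++ (differences.drop ((lo + hi) / 2)).take (hi - (lo + hi) / 2) := by
          rw [show hi - lo = ((lo + hi) / 2 - lo) + (hi - (lo + hi) / 2) by omega,
            List.take_add, List.drop_drop,
            show lo + ((lo + hi) / 2 - lo) = (lo + hi) / 2 by omega]
        rw [hsplit, agg_append]

-- ===== VERDICT (by name: the statement is the Claim_ definition above) =====
theorem numberOfArraysApproach3_spec : Claim_equal_numberOfArraysApproach3 := by
  intro differences lower upper _
  unfold Spec_numberOfArraysApproach3 numberOfArraysApproach3 numberOfArraysApproach3_alt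
  rw [foldA_eq, pvSeg_eq differences (differences.length - 0) 0 differences.length rfl le_rfl]
  simp [pvAgg]
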